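-- pv_equiv track=rewrite | github.com/rsomanigroq/SnackOverflow | backend/main.py | extract_nutrition_info
-- ===== SOURCE A (Python) =====
-- def extract_nutrition_info(analysis_result):
--     """Extract nutritional information from the analysis result"""
--     lines = analysis_result.split('\n')
--
--     for line in lines:
--         if "**Nutritional Information**:" in line:
--             idx = lines.index(line)
--             if idx + 1 < len(lines):
--                 nutrition_info = lines[idx + 1].strip()
--                 # Keep it short - just first sentence
--                 nutrition_info = nutrition_info.split('.')[0]
--                 return nutrition_info
--
--     return "a good source of vitamins"  # fallback
-- ===== SOURCE B (Python) =====
-- def extract_nutrition_info(analysis_result):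
--     """Extract nutritional information from the analysis result"""
--     _, found, after = analysis_result.partition("**Nutritional Information**:")
--     if not found:
--         return "a good source of vitamins"  # header absent
--     _, nl, tail = after.partition('\n')
--     if not nl:
--         return "a good source of vitamins"  # header on the last line
--     line, _, _ = tail.partition('\n')
--     return line.strip().partition('.')[0]
-- ===== Notes on version B (the rewrite author's own statement) =====
-- stated objective: idiomatic
-- what changed: Replaced the loop over the split line list (with a list.index re-scan and bounds check) by three str.partition calls on the raw string: cut at the first header occurrence, then at the next line break to reach the following line, then truncate at the first period; the string is never split into a line list at all.
import Mathlib
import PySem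

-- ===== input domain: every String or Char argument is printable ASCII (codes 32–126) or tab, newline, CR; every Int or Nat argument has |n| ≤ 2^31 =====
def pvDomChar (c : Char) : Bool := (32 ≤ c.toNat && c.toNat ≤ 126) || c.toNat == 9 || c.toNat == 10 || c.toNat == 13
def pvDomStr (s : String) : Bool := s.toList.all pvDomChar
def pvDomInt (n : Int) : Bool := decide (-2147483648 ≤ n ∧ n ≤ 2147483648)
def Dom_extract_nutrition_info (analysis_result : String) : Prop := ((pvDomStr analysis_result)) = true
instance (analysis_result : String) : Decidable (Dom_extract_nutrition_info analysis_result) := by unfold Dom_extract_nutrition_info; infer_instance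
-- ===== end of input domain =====

-- B drops A's split-into-lines loop (scan + list.index + bounds check) and instead cuts the
-- raw string with three str.partition calls (header, next newline, first '.'); idiomatic, no speed claim.

-- ===== PORT A =====
-- A's 'for line in lines' loop; 'lines' is the full list (needed by lines.index(line)).
-- s.split('\n') has a nonempty separator, so split? is always 'some': .getD [] is exact;
-- lines[idx+1] is guarded by idx+1 < len(lines), so pyGet? is always 'some': .getD "" is exact;
-- x.split('.') is never empty, so [0] is headD "".
def pvLoopA (lines : List String) : List String → String
  | [] => "a good source of vitamins"
  | line :: rest =>
    if PySem.Str.isIn "**Nutritional Information**:" line then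
      match PySem.List.index? lines line with
      | some idx =>
        if idx + 1 < lines.length then
          ((PySem.Str.split? (PySem.Str.strip ((PySem.List.pyGet? lines ((idx : Int) + 1)).getD "")) ".").getD []).headD ""
        else pvLoopA lines rest
      | none => pvLoopA lines rest
    else pvLoopA lines rest

def extract_nutrition_info (analysis_result : String) : String :=
  let lines := (PySem.Str.split? analysis_result "\n").getD []
  pvLoopA lines lines

-- ===== PORT B =====
-- Python's str.partition(sep) for a NONEMPTY sep (the only case B uses): cut at the FIRST
-- occurrence found by s.find(sep); exact hand port (PySem has find but no partition).
def pvPartition (s sep : List Char) : List Char × List Char × List Char :=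
  let i := PySem.Chars.find s sep
  if i = -1 then (s, [], []) else (s.take i.toNat, sep, s.drop (i.toNat + sep.length))

def pvMarkerC : List Char := "**Nutritional Information**:".toList
def pvFallback : String := "a good source of vitamins"

-- B's lines after the first guard: `_, nl, tail = after.partition('\n'); …`
def pvTailB (after : List Char) : String :=
  let n := pvPartition after ['\n']
  if n.2.1.isEmpty then pvFallback
  else
    let t := pvPartition n.2.2 ['\n']
    String.ofList (pvPartition (PySem.Chars.strip t.1) ['.']).1

def pvAltC (cs : List Char) : String :=
  let m := pvPartition cs pvMarkerC
  if m.2.1.isEmpty then pvFallback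
  else pvTailB m.2.2

def extract_nutrition_info_alt (analysis_result : String) : String :=
  pvAltC analysis_result.toList

-- ===== PRECONDITION & SPEC =====
def Spec_extract_nutrition_info (analysis_result : String) (out : String) : Prop := out = extract_nutrition_info_alt analysis_result
instance (analysis_result : String) (out : String) : Decidable (Spec_extract_nutrition_info analysis_result out) := by unfold Spec_extract_nutrition_info; infer_instance

-- ===== CLAIM (what is proved, stated in full; the proofs are below) =====
def Claim_equal_extract_nutrition_info : Prop := ∀ (analysis_result : String), Dom_extract_nutrition_info analysis_result → Spec_extract_nutrition_info analysis_result (extract_nutrition_info analysis_result)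

-- ===== LEMMAS AND PROOFS =====

def pvPairsStr : List String → String
  | [] => "a good source of vitamins"
  | [_] => "a good source of vitamins"
  | a :: b :: t =>
    if PySem.Str.isIn "**Nutritional Information**:" a then
      ((PySem.Str.split? (PySem.Str.strip b) ".").getD []).headD ""
    else pvPairsStr (b :: t)

lemma pv_index?_append {α : Type} [BEq α] [LawfulBEq α] (pfx rest : List α) (x : α)
    (hx : x ∉ pfx) : PySem.List.index? (pfx ++ x :: rest) x = some pfx.length := by
  unfold PySem.List.index?
  rw [List.idxOf?_eq_some_iff]
  refine ⟨by simp, by simp, ?_⟩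
  intro j hj hEq
  apply hx
  rw [List.getElem_append_left (by omega)] at hEq
  exact hEq ▸ List.getElem_mem _

lemma pv_loop_eq (rem pfx : List String)
    (h : ∀ l ∈ pfx, PySem.Str.isIn "**Nutritional Information**:" l = false) :
    pvLoopA (pfx ++ rem) rem = pvPairsStr rem := by
  induction rem generalizing pfx with
  | nil => rfl
  | cons line rest ih =>
    by_cases hl : PySem.Str.isIn "**Nutritional Information**:" line = true
    · have hnot : line ∉ pfx := fun hm => by rw [h line hm] at hl; exact Bool.false_ne_true hl
      rw [pvLoopA, hl]
      simp only [pv_index?_append _ _ _ hnot]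
      cases rest with
      | nil =>
        have hc : ¬ (pfx.length + 1 < (pfx ++ [line]).length) := by simp
        rw [if_neg hc]
        simp [pvLoopA, pvPairsStr]
      | cons r rs =>
        have h2 : PySem.List.pyGet? (pfx ++ line :: r :: rs) ((pfx.length : Int) + 1) = some r := by
          have h1 : ((pfx.length : Int) + 1) = ((pfx.length + 1 : Nat) : Int) := by push_cast; ring
          rw [h1, PySem.List.pyGet?_natCast, List.getElem?_append_right (by omega)]
          simp
        have hlt : pfx.length + 1 < (pfx ++ line :: r :: rs).length := by
          simp only [List.length_append, List.length_cons]; omega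
        rw [if_pos hlt, h2, pvPairsStr, if_pos hl]
        rfl
    · have hl' : PySem.Str.isIn "**Nutritional Information**:" line = false := by simpa using hl
      rw [pvLoopA, hl', if_neg (by decide)]
      have hA : pfx ++ line :: rest = (pfx ++ [line]) ++ rest := by simp
      rw [hA, ih (pfx ++ [line]) (fun l hm => by
        rcases List.mem_append.mp hm with hm | hm
        · exact h l hm
        · cases List.mem_singleton.mp hm; exact hl')]
      cases rest with
      | nil => rfl
      | cons r rs => rw [pvPairsStr, if_neg (by simpa using hl')]

def pvSplitCh (c : Char) : List Char → List (List Char)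
  | [] => [[]]
  | d :: rest => if d = c then [] :: pvSplitCh c rest else (pvSplitCh c rest).modifyHead (d :: ·)

lemma pv_splitCh_head? (c : Char) (x : List Char) :
    (pvSplitCh c x).head? = some (x.takeWhile (· ≠ c)) := by
  induction x with
  | nil => rfl
  | cons d rest ih =>
    by_cases h : d = c
    · subst h; simp [pvSplitCh, List.takeWhile_cons]
    · rw [pvSplitCh, if_neg h, List.takeWhile_cons]
      simp only [decide_eq_true_eq] at *
      rw [if_pos (by simpa using h)]
      cases hx : pvSplitCh c rest with
      | nil => rw [hx] at ih; simp at ih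
      | cons y t => rw [hx] at ih; simp at ih; simp [ih]

lemma pv_splitCh_ne_nil (c : Char) (x : List Char) : pvSplitCh c x ≠ [] := by
  have := pv_splitCh_head? c x
  intro h; rw [h] at this; simp at this

lemma pv_splitCh_no_sep (c : Char) (a : List Char) (h : c ∉ a) : pvSplitCh c a = [a] := by
  induction a with
  | nil => rfl
  | cons d rest ih =>
    simp only [List.mem_cons, not_or] at h
    rw [pvSplitCh, if_neg (fun he => h.1 he.symm), ih h.2]; rfl

lemma pv_splitCh_peel (c : Char) (a b : List Char) (h : c ∉ a) :
    pvSplitCh c (a ++ c :: b) = a :: pvSplitCh c b := by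
  induction a with
  | nil => simp [pvSplitCh]
  | cons d rest ih =>
    simp only [List.mem_cons, not_or] at h
    rw [List.cons_append, pvSplitCh, if_neg (fun he => h.1 he.symm), ih h.2]; rfl

lemma pv_takeWhile_no (c : Char) (a : List Char) (h : c ∉ a) : a.takeWhile (· ≠ c) = a := by
  rw [List.takeWhile_eq_self_iff]
  intro x hx; simp; exact fun he => h (he ▸ hx)

lemma pv_singleton_prefix (c : Char) (y : List Char) : [c] <+: y ↔ y.head? = some c := by
  cases y with
  | nil => simp
  | cons d t => simp [List.cons_prefix_cons, eq_comm]

lemma pv_prefix_cross_aux (c : Char) (r : List Char) :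
    ∀ (M a : List Char), c ∉ M → M <+: a ++ c :: r → M <+: a := by
  intro M
  induction M with
  | nil => intro a _ _; simp
  | cons x M' ih =>
    intro a hc h
    cases a with
    | nil =>
      rw [List.nil_append, List.cons_prefix_cons] at h
      exact absurd (h.1 ▸ List.mem_cons_self) hc
    | cons d a' =>
      rw [List.cons_append, List.cons_prefix_cons] at h
      rw [List.cons_prefix_cons]
      exact ⟨h.1, ih a' (fun hm => hc (List.mem_cons_of_mem _ hm)) h.2⟩

lemma pv_prefix_cross (M a r : List Char) (c : Char) (hc : c ∉ M) :
    M <+: a ++ c :: r ↔ M <+: a := by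
  constructor
  · exact pv_prefix_cross_aux c r M a hc
  · intro h; exact h.trans (List.prefix_append a (c :: r))

-- drop decomposition helpers
lemma pv_drop_le (a r : List Char) (c : Char) (i : Nat) (h : i ≤ a.length) :
    (a ++ c :: r).drop i = a.drop i ++ c :: r := List.drop_append_of_le_length h

lemma pv_drop_gt (a r : List Char) (c : Char) (i : Nat) (h : a.length < i) :
    (a ++ c :: r).drop i = r.drop (i - a.length - 1) := by
  have h1 : a ++ c :: r = (a ++ [c]) ++ r := by simp
  have h2 : i = (a ++ [c]).length + (i - a.length - 1) := by
    simp only [List.length_append, List.length_cons, List.length_nil]; omega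
  rw [h1, h2, List.drop_append]
  rw [List.drop_eq_nil_of_le (by simp), List.nil_append]
  congr 1
  simp only [List.length_append, List.length_cons, List.length_nil]
  omega

lemma pv_infix_split (M a r : List Char) (c : Char) (hc : c ∉ M)
    (h : M <:+: a ++ c :: r) : M <:+: a ∨ M <:+: r := by
  obtain ⟨u, v, huv⟩ := h
  have hp : M <+: (a ++ c :: r).drop u.length := by
    rw [← huv]; simp [List.drop_append]
  by_cases hi : u.length ≤ a.length
  · left
    rw [pv_drop_le _ _ _ _ hi, pv_prefix_cross _ _ _ _ hc] at hp
    exact hp.isInfix.trans (List.drop_suffix _ _).isInfix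
  · right
    rw [pv_drop_gt _ _ _ _ (by omega)] at hp
    exact hp.isInfix.trans (List.drop_suffix _ _).isInfix

lemma pv_find_eq_of (s M : List Char) (p : Nat) (hp : p ≤ s.length)
    (h1 : M <+: s.drop p) (h2 : ∀ i < p, ¬ M <+: s.drop i) :
    PySem.Chars.find s M = (p : Int) := by
  have hinf : M <:+: s := h1.isInfix.trans (List.drop_suffix _ _).isInfix
  have hnn : 0 ≤ PySem.Chars.find s M := (PySem.Chars.find_nonneg_iff s M).mpr hinf
  obtain ⟨hf1, hf2⟩ := PySem.Chars.find_spec hnn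
  have : (PySem.Chars.find s M).toNat = p := by
    rcases lt_trichotomy (PySem.Chars.find s M).toNat p with h | h | h
    · exact absurd hf1 (h2 _ h)
    · exact h
    · exact absurd h1 (hf2 p h)
  omega

lemma pv_find_left (M a r : List Char) (c : Char) (hc : c ∉ M) (hM : M <:+: a) :
    PySem.Chars.find (a ++ c :: r) M = PySem.Chars.find a M := by
  have hnn : 0 ≤ PySem.Chars.find a M := (PySem.Chars.find_nonneg_iff a M).mpr hM
  obtain ⟨hf1, hf2⟩ := PySem.Chars.find_spec hnn
  set q := (PySem.Chars.find a M).toNat with hq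
  have hql : (q : Int) ≤ a.length := by
    rw [hq]; rw [Int.toNat_of_nonneg hnn]; exact PySem.Chars.find_le_length a M
  have hq2 : q ≤ a.length := by exact_mod_cast hql
  rw [pv_find_eq_of (a ++ c :: r) M q]
  · omega
  · rw [List.length_append]; omega
  · rw [pv_drop_le _ _ _ _ hq2, pv_prefix_cross _ _ _ _ hc]; exact hf1
  · intro i hi
    rw [pv_drop_le _ _ _ _ (by omega), pv_prefix_cross _ _ _ _ hc]
    exact hf2 i hi

lemma pv_find_shift (M a r : List Char) (c : Char) (hc : c ∉ M)
    (hna : ¬ M <:+: a) (hr : M <:+: r) :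
    PySem.Chars.find (a ++ c :: r) M = (a.length : Int) + 1 + PySem.Chars.find r M := by
  have hnn : 0 ≤ PySem.Chars.find r M := (PySem.Chars.find_nonneg_iff r M).mpr hr
  obtain ⟨hf1, hf2⟩ := PySem.Chars.find_spec hnn
  set q := (PySem.Chars.find r M).toNat with hq
  have hq2 : q ≤ r.length := by
    have := PySem.Chars.find_le_length r M; omega
  rw [pv_find_eq_of (a ++ c :: r) M (a.length + 1 + q)]
  · push_cast; omega
  · simp; omega
  · rw [pv_drop_gt _ _ _ _ (by omega)]
    have : a.length + 1 + q - a.length - 1 = q := by omega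
    rw [this]; exact hf1
  · intro i hi
    by_cases hile : i ≤ a.length
    · rw [pv_drop_le _ _ _ _ hile, pv_prefix_cross _ _ _ _ hc]
      intro hpre
      exact hna (hpre.isInfix.trans (List.drop_suffix _ _).isInfix)
    · rw [pv_drop_gt _ _ _ _ (by omega)]
      exact hf2 _ (by omega)

lemma pv_find_none (s M : List Char) (h : ¬ M <:+: s) : PySem.Chars.find s M = -1 := by
  exact (PySem.Chars.find_eq_neg_one_iff s M).mpr h

lemma pv_singleton_not_infix (c : Char) (x : List Char) (h : c ∉ x) : ¬ [c] <:+: x :=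
  fun hi => h (hi.mem (by simp))

lemma pv_part_no (c : Char) (x : List Char) (h : c ∉ x) :
    pvPartition x [c] = (x, [], []) := by
  unfold pvPartition
  rw [pv_find_none x [c] (pv_singleton_not_infix c x h)]
  simp

lemma pv_find_singleton (c : Char) (a b : List Char) (h : c ∉ a) :
    PySem.Chars.find (a ++ c :: b) [c] = (a.length : Int) := by
  rw [pv_find_eq_of (a ++ c :: b) [c] a.length]
  · simp
  · rw [pv_drop_le _ _ _ _ le_rfl]; simp [pv_singleton_prefix]
  · intro i hi
    rw [pv_drop_le _ _ _ _ (by omega), pv_singleton_prefix]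
    cases hd : (a.drop i) with
    | nil => simp [List.drop_eq_nil_iff] at hd; omega
    | cons y t =>
      simp only [List.cons_append, List.head?_cons, Option.some.injEq]
      intro he
      exact h (he ▸ (hd ▸ List.drop_suffix i a).mem (by simp))

lemma pv_part_peel (c : Char) (a b : List Char) (h : c ∉ a) :
    pvPartition (a ++ c :: b) [c] = (a, [c], b) := by
  unfold pvPartition
  rw [pv_find_singleton c a b h]
  rw [if_neg (by omega)]
  simp only [Int.toNat_natCast, List.length_cons, List.length_nil]
  rw [List.take_left ..]
  have h1 : a.length + 1 = (a ++ [c]).length + 0 := by simp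
  have h2 : a ++ c :: b = (a ++ [c]) ++ b := by simp
  rw [h1, h2, List.drop_append]
  simp

lemma pv_takeWhile_not_mem (c : Char) (x : List Char) : c ∉ x.takeWhile (· ≠ c) := by
  intro hm
  have hp := List.mem_takeWhile_imp hm
  simp at hp

lemma pv_part_fst (c : Char) (x : List Char) :
    (pvPartition x [c]).1 = x.takeWhile (· ≠ c) := by
  by_cases h : c ∈ x
  · have hd : x.dropWhile (· ≠ c) ≠ [] := by
      intro hnil
      have hx0 := List.takeWhile_append_dropWhile (p := (· ≠ c)) (l := x)
      rw [hnil, List.append_nil] at hx0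
      rw [← hx0] at h
      exact pv_takeWhile_not_mem c x h
    cases hdw : x.dropWhile (· ≠ c) with
    | nil => exact absurd hdw hd
    | cons y t =>
      have hy : y = c := by
        have h2 := List.head_dropWhile_not (fun x => decide (x ≠ c)) (w := by rw [hdw]; simp)
        simp only [hdw, List.head_cons] at h2
        simpa using h2
      have hx : x = x.takeWhile (· ≠ c) ++ c :: t := by
        conv_lhs => rw [← List.takeWhile_append_dropWhile (p := (· ≠ c)) (l := x)]
        rw [hdw, hy]
      conv_lhs => rw [hx]
      rw [pv_part_peel c _ t (pv_takeWhile_not_mem c x)]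
  · rw [pv_part_no c x h, pv_takeWhile_no c x h]

lemma pv_modifyHead_id (L : List (List Char)) : L.modifyHead (fun x => x) = L := by
  cases L <;> rfl

lemma pv_go_nil (c : Char) (fuel : Nat) (cur : List Char) (acc : List (List Char)) :
    PySem.Chars.splitOn.go [c] (fuel+1) [] cur acc = (cur.reverse :: acc).reverse := by
  rw [PySem.Chars.splitOn.go.eq_def]

lemma pv_go_cons (c d : Char) (fuel : Nat) (rest cur : List Char) (acc : List (List Char)) :
    PySem.Chars.splitOn.go [c] (fuel+1) (d :: rest) cur acc
      = if [c].isPrefixOf (d :: rest) then PySem.Chars.splitOn.go [c] fuel rest [] (cur.reverse :: acc)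
        else PySem.Chars.splitOn.go [c] fuel rest (d :: cur) acc := by
  rw [PySem.Chars.splitOn.go.eq_def]
  rfl

lemma pv_go_zero (c : Char) (l cur : List Char) (acc : List (List Char)) :
    PySem.Chars.splitOn.go [c] 0 l cur acc = ((cur.reverse ++ l) :: acc).reverse := by
  rw [PySem.Chars.splitOn.go.eq_def]

lemma pv_go_single (c : Char) (fuel : Nat) (l cur : List Char) (acc : List (List Char))
    (h : l.length ≤ fuel) :
    PySem.Chars.splitOn.go [c] fuel l cur acc
      = acc.reverse ++ (pvSplitCh c l).modifyHead (cur.reverse ++ ·) := by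
  induction fuel generalizing l cur acc with
  | zero =>
    have hl : l = [] := by cases l <;> simp_all
    subst hl
    rw [pv_go_zero]
    simp [pvSplitCh]
  | succ fuel ih =>
    cases l with
    | nil =>
      rw [pv_go_nil]
      simp [pvSplitCh]
    | cons d rest =>
      rw [pv_go_cons]
      by_cases hdc : d = c
      · subst hdc
        rw [if_pos (by simp [List.isPrefixOf])]
        rw [ih _ _ _ (by simp at h; omega)]
        rw [pvSplitCh, if_pos rfl]
        simp [pv_modifyHead_id]
      · rw [if_neg (by simp [List.isPrefixOf]; intro he; exact absurd he.symm (by simpa using hdc))]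
        rw [ih _ _ _ (by simp at h; omega)]
        rw [pvSplitCh, if_neg hdc]
        cases hsp : pvSplitCh c rest with
        | nil => exact absurd hsp (pv_splitCh_ne_nil c rest)
        | cons y t => simp
lemma pv_splitOn_eq (c : Char) (l : List Char) :
    PySem.Chars.splitOn l [c] = pvSplitCh c l := by
  unfold PySem.Chars.splitOn
  rw [pv_go_single c (l.length + 1) l [] [] (by omega)]
  cases h : pvSplitCh c l with
  | nil => exact absurd h (pv_splitCh_ne_nil c l)
  | cons y t => simp

def pvPairsC : List (List Char) → String
  | [] => pvFallback
  | [_] => pvFallback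
  | a :: b :: t =>
    if PySem.Chars.isIn pvMarkerC a then
      String.ofList ((pvSplitCh '.' (PySem.Chars.strip b)).headD [])
    else pvPairsC (b :: t)

lemma pv_lines_eq (s : String) :
    (PySem.Str.split? s "\n").getD [] = (pvSplitCh '\n' s.toList).map String.ofList := by
  have h := PySem.Str.split?_map s "\n"
  rw [PySem.Chars.split?] at h
  rw [if_neg (by decide)] at h
  cases hsp : PySem.Str.split? s "\n" with
  | none => rw [hsp] at h; simp at h
  | some L =>
    rw [hsp] at h
    simp only [Option.map_some, Option.some.injEq] at h
    simp only [Option.getD_some]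
    have hL : L.map String.toList = PySem.Chars.splitOn s.toList "\n".toList := h
    have : "\n".toList = ['\n'] := by decide
    rw [this, pv_splitOn_eq] at hL
    rw [← hL]
    rw [List.map_map]
    exact (List.map_id'' (fun x => by simp) L).symm

lemma pv_isIn_conv (a : List Char) :
    PySem.Str.isIn "**Nutritional Information**:" (String.ofList a) = PySem.Chars.isIn pvMarkerC a := by
  rw [PySem.Str.isIn, pvMarkerC]
  simp

lemma pv_proc_conv (b : List Char) :
    ((PySem.Str.split? (PySem.Str.strip (String.ofList b)) ".").getD []).headD ""
      = String.ofList ((pvSplitCh '.' (PySem.Chars.strip b)).headD []) := by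
  have h := PySem.Str.split?_map (PySem.Str.strip (String.ofList b)) "."
  rw [PySem.Chars.split?, if_neg (by decide)] at h
  cases hsp : PySem.Str.split? (PySem.Str.strip (String.ofList b)) "." with
  | none => rw [hsp] at h; simp at h
  | some L =>
    rw [hsp] at h
    simp only [Option.map_some, Option.some.injEq] at h
    have hmap : L.map String.toList = pvSplitCh '.' (PySem.Chars.strip b) := by
      rw [h]
      have h1 : (PySem.Str.strip (String.ofList b)).toList = PySem.Chars.strip b := by
        rw [PySem.Str.toList_strip]; simp
      have h2 : ".".toList = ['.'] := by decide
      rw [h1, h2, pv_splitOn_eq]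
    simp only [Option.getD_some]
    cases L with
    | nil =>
      simp only [List.map_nil] at hmap
      exact absurd hmap.symm (pv_splitCh_ne_nil '.' (PySem.Chars.strip b))
    | cons y t =>
      simp only [List.map_cons] at hmap
      rw [← hmap]
      simp

lemma pv_pairs_conv (L : List (List Char)) :
    pvPairsStr (L.map String.ofList) = pvPairsC L := by
  induction L with
  | nil => rfl
  | cons a L ih =>
    cases L with
    | nil => rfl
    | cons b t =>
      simp only [List.map_cons]
      rw [pvPairsStr, pvPairsC, pv_isIn_conv]
      by_cases h : PySem.Chars.isIn pvMarkerC a = true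
      · rw [if_pos h, if_pos h, pv_proc_conv]
      · rw [if_neg h, if_neg h]
        simpa using ih

lemma pv_tailB_no_nl (after : List Char) (h : ('\n' : Char) ∉ after) :
    pvTailB after = pvFallback := by
  unfold pvTailB
  rw [pv_part_no _ _ h]
  rfl

lemma pv_splitCh_headD (c : Char) (x : List Char) :
    (pvSplitCh c x).headD [] = x.takeWhile (· ≠ c) := by
  have h := pv_splitCh_head? c x
  cases hx : pvSplitCh c x with
  | nil => exact absurd hx (pv_splitCh_ne_nil c x)
  | cons y t => rw [hx] at h; simpa using h

lemma pv_marker_no_nl : ('\n' : Char) ∉ pvMarkerC := by decide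

lemma pv_altC_no (s : List Char) (h : ¬ pvMarkerC <:+: s) : pvAltC s = pvFallback := by
  unfold pvAltC pvPartition
  rw [pv_find_none s _ h]
  rfl

lemma pv_altC_found (s : List Char) (h : pvMarkerC <:+: s) :
    pvAltC s = pvTailB (s.drop ((PySem.Chars.find s pvMarkerC).toNat + pvMarkerC.length)) := by
  have hnn : 0 ≤ PySem.Chars.find s pvMarkerC := (PySem.Chars.find_nonneg_iff s pvMarkerC).mpr h
  have hne : ¬ PySem.Chars.find s pvMarkerC = -1 := by omega
  unfold pvAltC pvPartition
  simp only [hne, if_false]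
  rw [if_neg (by decide)]

lemma pv_main_nonl (s : List Char) (hnl : ('\n' : Char) ∉ s) :
    pvPairsC (pvSplitCh '\n' s) = pvAltC s := by
  rw [pv_splitCh_no_sep _ _ hnl]
  by_cases hin : pvMarkerC <:+: s
  · rw [pv_altC_found s hin]
    rw [pv_tailB_no_nl _ (fun hm => hnl (List.mem_of_mem_drop hm))]
    rfl
  · rw [pv_altC_no s hin]
    rfl

lemma pv_main : ∀ (n : Nat) (s : List Char), s.length ≤ n →
    pvPairsC (pvSplitCh '\n' s) = pvAltC s := by
  intro n
  induction n with
  | zero =>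
    intro s hs
    have : s = [] := by cases s <;> simp_all
    subst this
    exact pv_main_nonl [] (by simp)
  | succ n ih =>
    intro s hs
    by_cases hnl : ('\n' : Char) ∈ s
    · -- peel the first line
      set a := s.takeWhile (· ≠ '\n') with ha
      have hna : ('\n' : Char) ∉ a := pv_takeWhile_not_mem '\n' s
      have hd : s.dropWhile (· ≠ '\n') ≠ [] := by
        intro hnil
        have hx0 := List.takeWhile_append_dropWhile (p := (· ≠ '\n')) (l := s)
        rw [hnil, List.append_nil] at hx0
        rw [← hx0] at hnl
        exact pv_takeWhile_not_mem '\n' s hnl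
      obtain ⟨y, t, hdw⟩ : ∃ y t, s.dropWhile (· ≠ '\n') = y :: t := by
        cases hdw : s.dropWhile (· ≠ '\n') with
        | nil => exact absurd hdw hd
        | cons y t => exact ⟨y, t, rfl⟩
      have hy : y = '\n' := by
        have h2 := List.head_dropWhile_not (fun x => decide (x ≠ '\n')) (w := by rw [hdw]; simp)
        simp only [hdw, List.head_cons] at h2
        simpa using h2
      have hsplit : s = a ++ '\n' :: t := by
        conv_lhs => rw [← List.takeWhile_append_dropWhile (p := (· ≠ '\n')) (l := s)]
        rw [hdw, hy]
      have hlen : t.length ≤ n := by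
        have := congrArg List.length hsplit
        simp at this; omega
      -- A side structure
      rw [hsplit, pv_splitCh_peel '\n' a t hna]
      obtain ⟨h0, t0, hr⟩ : ∃ h0 t0, pvSplitCh '\n' t = h0 :: t0 := by
        cases hr : pvSplitCh '\n' t with
        | nil => exact absurd hr (pv_splitCh_ne_nil '\n' t)
        | cons h0 t0 => exact ⟨h0, t0, rfl⟩
      have hh0 : h0 = t.takeWhile (· ≠ '\n') := by
        have := pv_splitCh_head? '\n' t
        rw [hr] at this; simpa using this
      rw [hr, pvPairsC]
      by_cases hMa : pvMarkerC <:+: a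
      · -- header in the first line
        rw [if_pos ((PySem.Chars.isIn_iff_infix _ _).mpr hMa)]
        -- B side
        have hMs : pvMarkerC <:+: a ++ '\n' :: t := hMa.trans ⟨[], '\n' :: t, by simp⟩
        rw [pv_altC_found _ hMs, pv_find_left pvMarkerC a t '\n' pv_marker_no_nl hMa]
        have hnn : 0 ≤ PySem.Chars.find a pvMarkerC := (PySem.Chars.find_nonneg_iff _ _).mpr hMa
        obtain ⟨hf1, _⟩ := PySem.Chars.find_spec hnn
        set q := (PySem.Chars.find a pvMarkerC).toNat with hq
        have hqlen : q + pvMarkerC.length ≤ a.length := by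
          have h1 := hf1.length_le
          simp only [List.length_drop] at h1
          have h2 : (PySem.Chars.find a pvMarkerC) ≤ (a.length : Int) := PySem.Chars.find_le_length a pvMarkerC
          omega
        rw [pv_drop_le a t '\n' (q + pvMarkerC.length) hqlen]
        unfold pvTailB
        have hmid : ('\n' : Char) ∉ a.drop (q + pvMarkerC.length) :=
          fun hm => hna (List.mem_of_mem_drop hm)
        rw [pv_part_peel '\n' _ t hmid]
        simp only [List.isEmpty_cons, Bool.false_eq_true, if_false]
        rw [pv_part_fst, pv_part_fst]
        rw [pv_splitCh_headD, hh0]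
      · -- no header in the first line: both sides reduce to t
        rw [if_neg (by rw [PySem.Chars.isIn_iff_infix]; exact hMa)]
        rw [← hr, ih t hlen]
        by_cases hMr : pvMarkerC <:+: t
        · have hMs : pvMarkerC <:+: a ++ '\n' :: t := by
            obtain ⟨u, v, huv⟩ := hMr
            exact ⟨a ++ '\n' :: u, v, by rw [← huv]; simp⟩
          rw [pv_altC_found _ hMs, pv_altC_found _ hMr]
          rw [pv_find_shift pvMarkerC a t '\n' pv_marker_no_nl hMa hMr]
          have hnn : 0 ≤ PySem.Chars.find t pvMarkerC := (PySem.Chars.find_nonneg_iff _ _).mpr hMr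
          set q := (PySem.Chars.find t pvMarkerC).toNat with hq
          have htn : ((a.length : Int) + 1 + PySem.Chars.find t pvMarkerC).toNat
              = a.length + 1 + q := by omega
          rw [htn]
          have hcut : (a ++ '\n' :: t).drop (a.length + 1 + q + pvMarkerC.length)
              = t.drop (q + pvMarkerC.length) := by
            rw [pv_drop_gt a t '\n' _ (by omega)]
            congr 1
            omega
          rw [hcut]
        · have hMs : ¬ pvMarkerC <:+: a ++ '\n' :: t := by
            intro hI
            rcases pv_infix_split pvMarkerC a t '\n' pv_marker_no_nl hI with h | h
            · exact hMa h
            · exact hMr h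
          rw [pv_altC_no _ hMs, pv_altC_no _ hMr]
    · exact pv_main_nonl s hnl

-- ===== VERDICT (by name: the statement is the Claim_ definition above) =====
theorem extract_nutrition_info_spec : Claim_equal_extract_nutrition_info := by
  intro s _
  unfold Spec_extract_nutrition_info extract_nutrition_info extract_nutrition_info_alt
  show pvLoopA _ _ = _
  have h0 := pv_loop_eq ((PySem.Str.split? s "\n").getD []) [] (by simp)
  simp only [List.nil_append] at h0
  rw [h0, pv_lines_eq, pv_pairs_conv]
  exact pv_main s.toList.length s.toList le_rfl
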